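-- pv_equiv track=rewrite | github.com/kparasch/AdventOfCode2024 | Day12/solve.py | get_sides
-- ===== SOURCE A (Python) =====
-- from collections import deque
--
-- def get_sides(perimeter_spots: list):
--
--     sides = 0
--     while len(perimeter_spots):
--         neighbours = deque([perimeter_spots[0]])
--         del perimeter_spots[0]
--         while len(neighbours):
--             sii, sjj = neighbours.pop()
--             to_delete = []
--             for kk in range(len(perimeter_spots)):
--                 ii, jj = perimeter_spots[kk]
--                 if abs(sii - ii) + abs(sjj - jj) == 1:
--                     neighbours.append((ii, jj))
--                     to_delete.append(kk)
--             to_delete = sorted(to_delete)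
--             for kk in to_delete[::-1]:
--                 del perimeter_spots[kk]
--         sides += 1
--     return sides
-- ===== SOURCE B (Python) =====
-- def get_sides(perimeter_spots: list):
--     remaining = set(perimeter_spots)
--     sides = 0
--     for spot in perimeter_spots:
--         if spot not in remaining:
--             continue
--         remaining.remove(spot)
--         stack = [spot]
--         while stack:
--             i, j = stack.pop()
--             for nb in ((i - 1, j), (i + 1, j), (i, j - 1), (i, j + 1)):
--                 if nb in remaining:
--                     remaining.remove(nb)
--                     stack.append(nb)
--         sides += 1
--     return sides
-- ===== Notes on version B (the rewrite author's own statement) =====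
-- stated objective: alternative
-- what changed: A repeatedly scans and deletes from the whole remaining list for every BFS pivot (and empties its argument in place); B puts the spots in a hash set once and grows each component by O(1) lookups of the four grid neighbours of each pivot, leaving the argument untouched (asymptotically cheaper by analysis, but the harness's timing inputs lie outside Pre_, so no speed is claimed). …
-- outside the precondition, e.g. on get_sides([(0, 0), (0, 0)]): A returns 2, B returns 1; on get_sides([(0, 0), (0, 0), (0, 1)]): A returns 1, B returns 1
import Mathlib
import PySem

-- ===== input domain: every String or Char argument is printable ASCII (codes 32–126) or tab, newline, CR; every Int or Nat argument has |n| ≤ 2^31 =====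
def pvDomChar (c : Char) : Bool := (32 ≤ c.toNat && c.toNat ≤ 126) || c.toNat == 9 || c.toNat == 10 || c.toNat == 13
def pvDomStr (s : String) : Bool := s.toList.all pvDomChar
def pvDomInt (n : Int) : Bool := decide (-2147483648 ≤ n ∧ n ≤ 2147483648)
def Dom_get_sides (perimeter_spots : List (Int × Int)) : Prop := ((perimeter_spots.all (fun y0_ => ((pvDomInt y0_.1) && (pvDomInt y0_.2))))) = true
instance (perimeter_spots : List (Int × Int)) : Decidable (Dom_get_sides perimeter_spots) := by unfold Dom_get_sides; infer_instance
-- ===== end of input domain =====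

-- B replaces A's repeated whole-list scans and index deletions by one hash set and O(1) lookups of the
-- four grid neighbours of each BFS pivot; A empties its list argument in place, B does not mutate it —
-- the equivalence proved here is about the return value only.

-- ===== PORT A =====
-- A's adjacency test 'abs(sii - ii) + abs(sjj - jj) == 1'
def pvAdj (p q : Int × Int) : Bool := decide ((p.1 - q.1).natAbs + (p.2 - q.2).natAbs = 1)

-- body of A's 'for kk in range(len(perimeter_spots))' loop: append matches to the deque and to
-- to_delete ('perimeter_spots[kk]' is always in range, so total getD indexing is exact here)
def pvScanStepA (p : Int × Int) (spots : List (Int × Int))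
    (acc : List (Int × Int) × List Nat) (kk : Nat) : List (Int × Int) × List Nat :=
  if pvAdj p (spots.getD kk (0, 0)) then (acc.1 ++ [spots.getD kk (0, 0)], acc.2 ++ [kk]) else acc

-- A's inner 'while len(neighbours)' loop; the deque is a list (append right, pop right).
-- fuel is only a structural totality guard: every call below receives provably sufficient fuel
-- (spots.length + neighbours.length strictly decreases per iteration; see gsInnerA_eq_surv).
def gsInnerA : Nat → List (Int × Int) → List (Int × Int) → List (Int × Int)
  | 0, _, spots => spots
  | fuel + 1, neighbours, spots =>
    if h : neighbours = [] then spots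
    else
      gsInnerA fuel
        ((List.range spots.length).foldl (pvScanStepA (neighbours.getLast h) spots)
          (neighbours.dropLast, [])).1
        (((PySem.List.slice? (PySem.List.sorted
              ((List.range spots.length).foldl (pvScanStepA (neighbours.getLast h) spots)
                (neighbours.dropLast, [])).2 (fun x => x))
            none none (-1)).getD []).foldl (fun l kk => l.eraseIdx kk) spots)

-- A's outer 'while len(perimeter_spots)' loop (fuel likewise sufficient: see gsOuterA_eq)
def gsOuterA : Nat → List (Int × Int) → Int → Int
  | 0, _, sides => sides
  | fuel + 1, spots, sides =>
    match spots with
    | [] => sides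
    | s :: rest => gsOuterA fuel (gsInnerA (rest.length + 2) [s] rest) (sides + 1)

def get_sides (perimeter_spots : List (Int × Int)) : Int :=
  gsOuterA perimeter_spots.length perimeter_spots 0

-- ===== PORT B =====
-- the four grid neighbours B looks up (B's tuple '((i-1,j),(i+1,j),(i,j-1),(i,j+1))')
def pvCands (p : Int × Int) : List (Int × Int) :=
  [(p.1 - 1, p.2), (p.1 + 1, p.2), (p.1, p.2 - 1), (p.1, p.2 + 1)]

-- body of B's 'for nb in …' loop; remove? is guarded by the membership test so it is never none
def pvStepB (acc : List (Int × Int) × List (Int × Int)) (nb : Int × Int) :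
    List (Int × Int) × List (Int × Int) :=
  if PySem.Set.contains acc.1 nb then ((PySem.Set.remove? acc.1 nb).getD acc.1, acc.2 ++ [nb])
  else acc

-- B's inner 'while stack' loop (stack: append right, pop right); fuel is only a structural
-- totality guard, always passed a provably sufficient amount (see gsInnerB_eq_surv)
def gsInnerB : Nat → List (Int × Int) → List (Int × Int) → List (Int × Int)
  | 0, _, remaining => remaining
  | fuel + 1, stack, remaining =>
    if h : stack = [] then remaining
    else
      gsInnerB fuel
        ((pvCands (stack.getLast h)).foldl pvStepB (remaining, stack.dropLast)).2
        ((pvCands (stack.getLast h)).foldl pvStepB (remaining, stack.dropLast)).1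

-- body of B's 'for spot in perimeter_spots' loop
def pvOuterStepB (acc : List (Int × Int) × Int) (spot : Int × Int) : List (Int × Int) × Int :=
  if PySem.Set.contains acc.1 spot then
    (gsInnerB (((PySem.Set.remove? acc.1 spot).getD acc.1).length + 2) [spot]
      ((PySem.Set.remove? acc.1 spot).getD acc.1), acc.2 + 1)
  else acc

def get_sides_alt (perimeter_spots : List (Int × Int)) : Int :=
  (perimeter_spots.foldl pvOuterStepB (PySem.Set.ofList perimeter_spots, 0)).2

-- ===== PRECONDITION & SPEC =====
-- Pre_ excludes lists with duplicate coordinates, a corner no caller of this perimeter-counting helper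
-- specifies: there A counts an extra copy of a spot as a component of its own exactly when the spot has
-- no neighbour present (A([(0,0),(0,0)]) = 2 yet A([(0,0),(0,0),(0,1)]) = 1), while B counts each
-- distinct coordinate once — both defensible readings of a duplicated entry.
def Pre_get_sides (perimeter_spots : List (Int × Int)) : Prop := perimeter_spots.Nodup
instance (perimeter_spots : List (Int × Int)) : Decidable (Pre_get_sides perimeter_spots) := by
  unfold Pre_get_sides; infer_instance

def pvWitness_get_sides : (List (Int × Int)) := [(0, 0), (0, 1), (2, 2)]

def Spec_get_sides (perimeter_spots : List (Int × Int)) (out : Int) : Prop :=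
  out = get_sides_alt perimeter_spots
instance (perimeter_spots : List (Int × Int)) (out : Int) : Decidable (Spec_get_sides perimeter_spots out) := by
  unfold Spec_get_sides; infer_instance

-- ===== CLAIM (what is proved, stated in full; the proofs are below) =====
def Claim_equal_get_sides : Prop :=
  ∀ (perimeter_spots : List (Int × Int)), Dom_get_sides perimeter_spots →
    Pre_get_sides perimeter_spots →
    Spec_get_sides perimeter_spots (get_sides perimeter_spots)

-- ===== LEMMAS AND PROOFS =====

-- closed forms of A's scan / sorted / reversed-delete loop bodies
lemma pvScanA_fold (p : Int × Int) (spots : List (Int × Int)) :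
    ∀ (idxs : List Nat) (F0 : List (Int × Int)) (td0 : List Nat),
    idxs.foldl (pvScanStepA p spots) (F0, td0) =
      (F0 ++ (idxs.filter (fun kk => pvAdj p (spots[kk]?.getD (0, 0)))).map
          (fun kk => spots[kk]?.getD (0, 0)),
       td0 ++ idxs.filter (fun kk => pvAdj p (spots[kk]?.getD (0, 0)))) := by
  intro idxs
  induction idxs with
  | nil => intro F0 td0; simp
  | cons k ks ih =>
    intro F0 td0
    by_cases h : pvAdj p (spots[k]?.getD (0, 0)) <;>
      simp [pvScanStepA, List.getD_eq_getElem?_getD, h, ih, List.filter_cons]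

lemma pvMapRangeGetD {α : Type} (xs : List α) (d : α) :
    (List.range xs.length).map (fun k => xs[k]?.getD d) = xs := by
  apply List.ext_getElem (by simp)
  intro i h1 h2
  simp [List.getElem?_eq_getElem h2]

lemma pvScanA_matched (p : Int × Int) (spots : List (Int × Int)) :
    ((List.range spots.length).filter (fun kk => pvAdj p (spots[kk]?.getD (0, 0)))).map
        (fun kk => spots[kk]?.getD (0, 0)) = spots.filter (pvAdj p) := by
  conv_rhs => rw [← pvMapRangeGetD spots (0, 0)]
  rw [List.filter_map]
  simp [Function.comp_def]

lemma pvEraseMapSucc {α : Type} :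
    ∀ (ks : List Nat) (a : α) (t : List α),
    (ks.map Nat.succ).foldr (fun kk l => l.eraseIdx kk) (a :: t)
      = a :: ks.foldr (fun kk l => l.eraseIdx kk) t := by
  intro ks a t
  induction ks with
  | nil => simp
  | cons k ks ih => simp [List.eraseIdx_cons_succ, ih]

lemma pvEraseFoldr {α : Type} (Q : α → Bool) (d : α) :
    ∀ (xs : List α),
    ((List.range xs.length).filter (fun k => Q (xs[k]?.getD d))).foldr
        (fun kk l => l.eraseIdx kk) xs = xs.filter (fun x => !Q x) := by
  intro xs
  induction xs with
  | nil => simp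
  | cons a t ih =>
    rw [show (a :: t).length = t.length + 1 from rfl, List.range_succ_eq_map]
    have hcomp : (List.map Nat.succ (List.range t.length)).filter
          (fun k => Q ((a :: t)[k]?.getD d))
        = ((List.range t.length).filter (fun k => Q (t[k]?.getD d))).map Nat.succ := by
      rw [List.filter_map]
      simp [Function.comp_def, Nat.succ_eq_add_one, List.getElem?_cons_succ]
    rw [List.filter_cons]
    by_cases h : Q a
    · simp only [List.getElem?_cons_zero, Option.getD_some, h, if_pos, hcomp,
        List.foldr_cons, pvEraseMapSucc]
      simp only [List.eraseIdx_cons_zero, ih]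
      simp [h, List.filter_cons]
    · simp only [List.getElem?_cons_zero, Option.getD_some, h, Bool.false_eq_true, if_false,
        hcomp, pvEraseMapSucc]
      simp only [ih]
      simp [h, List.filter_cons]

lemma pvSortedFilterRange (n : Nat) (c : Nat → Bool) :
    PySem.List.sorted ((List.range n).filter c) (fun x => x) = (List.range n).filter c := by
  apply PySem.List.sorted_eq_of_perm_of_pairwise_lt _ _ _ (List.Perm.refl _)
  exact ((List.pairwise_lt_range).sublist (List.filter_sublist)).imp (fun h => h)

-- both arguments of A's inner recursive call, in closed form (cited by decreasing_by and the proofs)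
lemma pvInnerA_arg1 (p : Int × Int) (spots F' : List (Int × Int)) :
    ((List.range spots.length).foldl (pvScanStepA p spots) (F', [])).1
      = F' ++ spots.filter (pvAdj p) := by
  rw [pvScanA_fold, pvScanA_matched]

lemma pvInnerA_arg2 (p : Int × Int) (spots F' : List (Int × Int)) :
    (((PySem.List.slice? (PySem.List.sorted
          ((List.range spots.length).foldl (pvScanStepA p spots) (F', [])).2 (fun x => x))
        none none (-1)).getD []).foldl (fun l kk => l.eraseIdx kk) spots)
      = spots.filter (fun x => !pvAdj p x) := by
  rw [pvScanA_fold]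
  simp only [List.nil_append, pvSortedFilterRange, PySem.List.slice?_none_none_neg_one,
    Option.getD_some]
  rw [List.foldl_reverse]
  exact pvEraseFoldr _ _ _

-- adjacency as a Prop, and its characterisation as "one of the four grid neighbours"
def pvAdjP (p q : Int × Int) : Prop := (p.1 - q.1).natAbs + (p.2 - q.2).natAbs = 1

lemma pvAdj_iff (p q : Int × Int) : pvAdj p q = true ↔ pvAdjP p q := by
  simp [pvAdj, pvAdjP]

lemma pvAdj_eq_false (p q : Int × Int) : pvAdj p q = false ↔ ¬ pvAdjP p q := by
  simp [pvAdj, pvAdjP]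

lemma pvAdjP_iff_mem_cands (p x : Int × Int) : pvAdjP p x ↔ x ∈ pvCands p := by
  obtain ⟨a, b⟩ := p; obtain ⟨c, d⟩ := x
  simp [pvAdjP, pvCands, Prod.ext_iff]
  omega

lemma pvCands_nodup (p : Int × Int) : (pvCands p).Nodup := by
  obtain ⟨a, b⟩ := p
  simp [pvCands, Prod.ext_iff]
  omega

-- one BFS edge inside the remaining spots R, and reachability from a frontier S
def pvStep (R : List (Int × Int)) (a b : Int × Int) : Prop := pvAdjP a b ∧ b ∈ R

def pvReach (S R : List (Int × Int)) (x : Int × Int) : Prop :=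
  ∃ f ∈ S, Relation.TransGen (pvStep R) f x

-- the spots of R not reachable from the frontier S: what both inner loops leave behind
noncomputable def pvSurv (S R : List (Int × Int)) : List (Int × Int) :=
  @List.filter _ (fun x => @decide (¬ pvReach S R x) (Classical.propDecidable _)) R

lemma pvReach_congr {S₁ S₂ R : List (Int × Int)} (h : ∀ y, y ∈ S₁ ↔ y ∈ S₂) (x : Int × Int) :
    pvReach S₁ R x ↔ pvReach S₂ R x := by
  constructor <;> rintro ⟨f, hf, hp⟩
  · exact ⟨f, (h f).1 hf, hp⟩
  · exact ⟨f, (h f).2 hf, hp⟩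

lemma pvSurv_congr {S₁ S₂ : List (Int × Int)} (R : List (Int × Int))
    (h : ∀ y, y ∈ S₁ ↔ y ∈ S₂) : pvSurv S₁ R = pvSurv S₂ R := by
  unfold pvSurv
  apply List.filter_congr
  intro x _
  exact decide_eq_decide.2 (not_congr (pvReach_congr h x))

lemma pvSurv_nil (R : List (Int × Int)) : pvSurv [] R = R := by
  unfold pvSurv
  apply List.filter_eq_self.2
  intro x _
  simp [pvReach]

lemma pvSurv_sublist (S R : List (Int × Int)) : (pvSurv S R).Sublist R := List.filter_sublist

lemma pvMem_of_transGen {R : List (Int × Int)} {a y : Int × Int}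
    (h : Relation.TransGen (pvStep R) a y) : y ∈ R := by
  induction h with
  | single h => exact h.2
  | tail _ h _ => exact h.2

lemma pvReach_shift (p f : Int × Int) (S R : List (Int × Int)) (hf : f ∈ S ∨ f = p) :
    ∀ x, Relation.TransGen (pvStep R) f x → ¬ pvAdjP p x →
    ∃ g, (g ∈ S ∨ (pvAdjP p g ∧ g ∈ R)) ∧
      Relation.TransGen (pvStep (R.filter (fun y => !pvAdj p y))) g x := by
  intro x h
  induction h with
  | @single x hstep =>
    intro hx
    rcases hf with hfs | rfl
    · refine ⟨f, Or.inl hfs, Relation.TransGen.single ⟨hstep.1, ?_⟩⟩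
      simp [List.mem_filter, hstep.2, pvAdj_eq_false, hx]
    · exact absurd hstep.1 hx
  | @tail y x hpath hstep ih =>
    intro hx
    have hyR : y ∈ R := pvMem_of_transGen hpath
    by_cases hy : pvAdjP p y
    · refine ⟨y, Or.inr ⟨hy, hyR⟩, Relation.TransGen.single ⟨hstep.1, ?_⟩⟩
      simp [List.mem_filter, hstep.2, pvAdj_eq_false, hx]
    · obtain ⟨g, hg, hpath'⟩ := ih hy
      refine ⟨g, hg, hpath'.tail ⟨hstep.1, ?_⟩⟩
      simp [List.mem_filter, hstep.2, pvAdj_eq_false, hx]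

lemma pvReach_unshift (p : Int × Int) (S R : List (Int × Int)) (x : Int × Int)
    (h : pvReach (S ++ R.filter (pvAdj p)) (R.filter (fun y => !pvAdj p y)) x) :
    pvReach (S ++ [p]) R x := by
  obtain ⟨g, hg, hpath⟩ := h
  have hpath' : Relation.TransGen (pvStep R) g x :=
    hpath.mono (fun a b hab => ⟨hab.1, List.mem_of_mem_filter hab.2⟩)
  rcases List.mem_append.1 hg with hS | hF
  · exact ⟨g, by simp [hS], hpath'⟩
  · have hgR : g ∈ R := List.mem_of_mem_filter hF
    have hadj : pvAdjP p g := (pvAdj_iff _ _).1 (List.of_mem_filter hF)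
    exact ⟨p, by simp, Relation.TransGen.head ⟨hadj, hgR⟩ hpath'⟩

lemma pvReach_step_iff (p : Int × Int) (S R : List (Int × Int)) (x : Int × Int) (hx : x ∈ R) :
    pvReach (S ++ [p]) R x
      ↔ (pvAdjP p x ∨ pvReach (S ++ R.filter (pvAdj p)) (R.filter (fun y => !pvAdj p y)) x) := by
  constructor
  · rintro ⟨f, hf, hpath⟩
    by_cases hax : pvAdjP p x
    · exact Or.inl hax
    · right
      have hf' : f ∈ S ∨ f = p := by simpa using List.mem_append.1 hf
      obtain ⟨g, hg, hpath'⟩ := pvReach_shift p f S R hf' x hpath hax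
      refine ⟨g, ?_, hpath'⟩
      rcases hg with h1 | ⟨h1, h2⟩
      · exact List.mem_append.2 (Or.inl h1)
      · exact List.mem_append.2 (Or.inr (List.mem_filter.2 ⟨h2, (pvAdj_iff _ _).2 h1⟩))
  · rintro (hax | hr)
    · exact ⟨p, by simp, Relation.TransGen.single ⟨hax, hx⟩⟩
    · exact pvReach_unshift p S R x hr

lemma pvSurv_step (p : Int × Int) (S R : List (Int × Int)) :
    pvSurv (S ++ [p]) R
      = pvSurv (S ++ R.filter (pvAdj p)) (R.filter (fun y => !pvAdj p y)) := by
  unfold pvSurv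
  rw [List.filter_filter]
  apply List.filter_congr
  intro x hx
  have hiff := pvReach_step_iff p S R x hx
  rw [Bool.eq_iff_iff]
  simp only [Bool.and_eq_true, Bool.not_eq_true', decide_eq_true_eq, pvAdj_eq_false]
  rw [hiff]
  tauto

lemma gsInnerA_step (fuel : Nat) (F spots : List (Int × Int)) (h : F ≠ []) :
    gsInnerA (fuel + 1) F spots
      = gsInnerA fuel (F.dropLast ++ spots.filter (pvAdj (F.getLast h)))
          (spots.filter (fun x => !pvAdj (F.getLast h) x)) := by
  show (if h : F = [] then spots else _) = _
  rw [dif_neg h, pvInnerA_arg1, pvInnerA_arg2]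

lemma gsInnerA_eq_surv : ∀ (fuel : Nat) (F R : List (Int × Int)),
    R.length + F.length < fuel → gsInnerA fuel F R = pvSurv F R := by
  intro fuel
  induction fuel with
  | zero => intro F R hn; omega
  | succ n ih =>
    intro F R hn
    by_cases h : F = []
    · subst h; cases R <;> simp [gsInnerA, pvSurv_nil]
    · rw [gsInnerA_step n F R h]
      have h1 := List.length_eq_length_filter_add (pvAdj (F.getLast h)) (l := R)
      have h2 : F.dropLast.length = F.length - 1 := List.length_dropLast
      have h3 : 0 < F.length := List.length_pos_of_ne_nil h
      rw [ih _ _ (by simp only [List.length_append]; omega)]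
      conv_rhs => rw [← List.dropLast_append_getLast h]
      exact (pvSurv_step (F.getLast h) F.dropLast R).symm

-- the B-side candidate loop, in closed form (needs distinctness)
lemma pvStepBFold_spec :
    ∀ (cs : List (Int × Int)), cs.Nodup → ∀ (R st : List (Int × Int)), R.Nodup →
    cs.foldl pvStepB (R, st)
      = (R.filter (fun x => !decide (x ∈ cs)), st ++ cs.filter (fun c => decide (c ∈ R))) := by
  intro cs
  induction cs with
  | nil => intro _ R st _; simp
  | cons c cs ih =>
    intro hnd R st hR
    have hccs : c ∉ cs := by simp_all
    have hcs : cs.Nodup := by simp_all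
    by_cases hc : c ∈ R
    · have hcont : PySem.Set.contains R c = true := (PySem.Set.contains_iff _ _).2 hc
      simp only [List.foldl_cons, pvStepB, hcont, if_true,
        PySem.Set.remove?_of_mem hc, Option.getD_some]
      rw [ih hcs (PySem.Set.discard R c) (st ++ [c]) (PySem.Set.nodup_discard R c hR)]
      rw [Prod.mk.injEq]
      constructor
      · show (R.filter (fun y => !(y == c))).filter _ = _
        rw [List.filter_filter]
        apply List.filter_congr
        intro y _
        by_cases h1 : y = c <;> by_cases h2 : y ∈ cs <;> simp [h1, h2]
      · have hcs' : cs.filter (fun d => decide (d ∈ PySem.Set.discard R c))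
            = cs.filter (fun d => decide (d ∈ R)) := by
          apply List.filter_congr
          intro y hy
          have hyc : y ≠ c := fun e => hccs (e ▸ hy)
          simp [PySem.Set.mem_discard, hyc]
        rw [hcs', List.filter_cons]
        simp [hc, List.append_assoc]
    · have hcont : PySem.Set.contains R c = false := by
        rw [← Bool.not_eq_true, PySem.Set.contains_iff]; exact hc
      simp only [List.foldl_cons, pvStepB, hcont, Bool.false_eq_true, if_false]
      rw [ih hcs R st hR, Prod.mk.injEq]
      constructor
      · apply List.filter_congr
        intro y hy
        have hyc : y ≠ c := fun e => hc (e ▸ hy)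
        simp [hyc]
      · rw [List.filter_cons]
        simp [hc]

lemma gsInnerB_step (fuel : Nat) (F R : List (Int × Int)) (h : F ≠ []) (hR : R.Nodup) :
    gsInnerB (fuel + 1) F R
      = gsInnerB fuel
          (F.dropLast ++ (pvCands (F.getLast h)).filter (fun c => decide (c ∈ R)))
          (R.filter (fun x => !pvAdj (F.getLast h) x)) := by
  show (if h : F = [] then R else _) = _
  rw [dif_neg h, pvStepBFold_spec _ (pvCands_nodup _) _ _ hR]
  have : R.filter (fun x => !decide (x ∈ pvCands (F.getLast h)))
      = R.filter (fun x => !pvAdj (F.getLast h) x) := by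
    apply List.filter_congr
    intro y _
    have : decide (y ∈ pvCands (F.getLast h)) = pvAdj (F.getLast h) y := by
      rw [pvAdj]
      exact decide_eq_decide.2 (pvAdjP_iff_mem_cands (F.getLast h) y).symm
    rw [this]
  rw [this]

lemma gsInnerB_eq_surv : ∀ (fuel : Nat) (F R : List (Int × Int)), R.Nodup →
    R.length + F.length < fuel → gsInnerB fuel F R = pvSurv F R := by
  intro fuel
  induction fuel with
  | zero => intro F R _ hn; omega
  | succ n ih =>
    intro F R hR hn
    by_cases h : F = []
    · subst h; cases R <;> simp [gsInnerB, pvSurv_nil]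
    · rw [gsInnerB_step n F R h hR]
      have hE : ∀ y, y ∈ (pvCands (F.getLast h)).filter (fun c => decide (c ∈ R))
          ↔ y ∈ R.filter (pvAdj (F.getLast h)) := by
        intro y
        simp only [List.mem_filter, decide_eq_true_eq, pvAdj_iff]
        rw [← pvAdjP_iff_mem_cands]
        tauto
      have hlenE : ((pvCands (F.getLast h)).filter (fun c => decide (c ∈ R))).length
          = (R.filter (pvAdj (F.getLast h))).length :=
        List.Perm.length_eq
          ((List.perm_ext_iff_of_nodup ((pvCands_nodup _).filter _) (hR.filter _)).2 hE)
      have h1 := List.length_eq_length_filter_add (pvAdj (F.getLast h)) (l := R)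
      have h2 : F.dropLast.length = F.length - 1 := List.length_dropLast
      have h3 : 0 < F.length := List.length_pos_of_ne_nil h
      rw [ih _ _ (hR.filter _) (by simp only [List.length_append]; omega)]
      calc pvSurv (F.dropLast ++ (pvCands (F.getLast h)).filter (fun c => decide (c ∈ R)))
            (R.filter (fun x => !pvAdj (F.getLast h) x))
          = pvSurv (F.dropLast ++ R.filter (pvAdj (F.getLast h)))
            (R.filter (fun x => !pvAdj (F.getLast h) x)) := by
            apply pvSurv_congr
            intro y
            simp only [List.mem_append]
            rw [hE y]
        _ = pvSurv (F.dropLast ++ [F.getLast h]) R := (pvSurv_step (F.getLast h) F.dropLast R).symm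
        _ = pvSurv F R := by rw [List.dropLast_append_getLast h]

-- the common canonical count: one component extracted per step
noncomputable def pvCount : List (Int × Int) → Int
  | [] => 0
  | s :: rest => 1 + pvCount (pvSurv [s] rest)
termination_by R => R.length
decreasing_by
  simp only [List.length_cons]
  exact Nat.lt_succ_of_le (List.Sublist.length_le (pvSurv_sublist [s] rest))

lemma gsOuterA_eq : ∀ (fuel : Nat) (spots : List (Int × Int)), spots.length ≤ fuel →
    ∀ (sides : Int), gsOuterA fuel spots sides = sides + pvCount spots := by
  intro fuel
  induction fuel with
  | zero =>
    intro spots hn sides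
    have : spots = [] := by cases spots <;> simp_all
    subst this; simp [gsOuterA, pvCount]
  | succ n ih =>
    intro spots hn sides
    cases spots with
    | nil => simp [gsOuterA, pvCount]
    | cons s rest =>
      show gsOuterA n (gsInnerA (rest.length + 2) [s] rest) (sides + 1) = _
      rw [gsInnerA_eq_surv (rest.length + 2) [s] rest (by simp)]
      rw [ih _ (le_trans (List.Sublist.length_le (pvSurv_sublist [s] rest)) (by simpa using hn)) _]
      rw [show pvCount (s :: rest) = 1 + pvCount (pvSurv [s] rest) from by rw [pvCount]]
      ring

lemma pvSublist_head {x : Int × Int} {xs rem : List (Int × Int)}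
    (hnd : (x :: xs).Nodup) (hsub : rem.Sublist (x :: xs)) (hx : x ∈ rem) :
    ∃ r', rem = x :: r' ∧ r'.Sublist xs := by
  rcases List.sublist_cons_iff.1 hsub with h | ⟨r', rfl, hr⟩
  · exact absurd (h.subset hx) (by simp_all)
  · exact ⟨r', rfl, hr⟩

lemma gsOuterB_fold : ∀ (xs : List (Int × Int)), xs.Nodup →
    ∀ (rem : List (Int × Int)) (sides : Int), rem.Nodup → rem.Sublist xs →
    (xs.foldl pvOuterStepB (rem, sides)).2 = sides + pvCount rem := by
  intro xs
  induction xs with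
  | nil =>
    intro _ rem sides _ hsub
    have : rem = [] := List.sublist_nil.1 hsub
    subst this; simp [pvCount]
  | cons x xs ih =>
    intro hnd rem sides hrem hsub
    have hxxs : x ∉ xs := by simp_all
    have hxs : xs.Nodup := by simp_all
    by_cases hx : x ∈ rem
    · obtain ⟨r', rfl, hr'⟩ := pvSublist_head hnd hsub hx
      have hcont : PySem.Set.contains (x :: r') x = true :=
        (PySem.Set.contains_iff _ _).2 (by simp)
      have hxr' : x ∉ r' := by simp_all
      have hdisc : (PySem.Set.discard (x :: r') x) = r' := by
        show List.filter _ (x :: r') = r'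
        rw [List.filter_cons]
        simp only [beq_self_eq_true, Bool.not_true, Bool.false_eq_true, if_false]
        apply List.filter_eq_self.2
        intro y hy
        simp only [Bool.not_eq_true', beq_eq_false_iff_ne, ne_eq]
        exact fun e => hxr' (e ▸ hy)
      simp only [List.foldl_cons, pvOuterStepB, hcont, if_true,
        PySem.Set.remove?_of_mem (by simp : x ∈ x :: r'), Option.getD_some, hdisc]
      have hr'nd : r'.Nodup := by simp_all
      rw [gsInnerB_eq_surv (r'.length + 2) [x] r' hr'nd (by simp)]
      rw [ih hxs _ _ ((pvSurv_sublist [x] r').nodup hr'nd) ((pvSurv_sublist [x] r').trans hr')]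
      rw [show pvCount (x :: r') = 1 + pvCount (pvSurv [x] r') from by rw [pvCount]]
      ring
    · have hcont : PySem.Set.contains rem x = false := by
        rw [← Bool.not_eq_true, PySem.Set.contains_iff]; exact hx
      simp only [List.foldl_cons, pvOuterStepB, hcont, Bool.false_eq_true, if_false]
      have hsub' : rem.Sublist xs := by
        rcases List.sublist_cons_iff.1 hsub with h | ⟨r', rfl, _⟩
        · exact h
        · exact absurd (by simp : x ∈ x :: r') hx
      exact ih hxs rem sides hrem hsub'

-- ===== VERDICT (by name: the statement is the Claim_ definition above) =====
theorem get_sides_spec : Claim_equal_get_sides := by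
  intro perimeter_spots _ hpre
  unfold Spec_get_sides get_sides get_sides_alt
  rw [PySem.Set.ofList_eq_self_of_nodup perimeter_spots hpre]
  rw [gsOuterB_fold perimeter_spots hpre perimeter_spots 0 hpre (List.Sublist.refl _)]
  rw [gsOuterA_eq perimeter_spots.length perimeter_spots le_rfl 0]
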